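-- pv_equiv track=rewrite | github.com/oleksii-shcherbak/GoIt-CS | goit-cs-hw-05/word_analysis.py | map_reduce_parallel
-- ===== SOURCE A (Python) =====
-- import string
-- from collections import defaultdict
-- from concurrent.futures import ThreadPoolExecutor
-- from typing import Dict, List, Tuple
--
-- def map_function(text: str) -> List[Tuple[str, int]]:
--     """
--     Map function that processes text and returns word-count pairs.
--
--     Args:
--         text: Input text to process
--
--     Returns:
--         List of (word, 1) tuples
--     """
--     # Convert to lowercase and remove punctuation
--     text = text.lower()
--     text = text.translate(str.maketrans('', '', string.punctuation))
--
--     # Split into words and filter out empty strings and short words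
--     words = [word.strip() for word in text.split() if len(word.strip()) > 2]
--
--     return [(word, 1) for word in words if word]
--
-- def shuffle_function(mapped_values: List[Tuple[str, int]]) -> List[Tuple[str, List[int]]]:
--     """
--     Shuffle function that groups mapped values by key.
--
--     Args:
--         mapped_values: List of (word, count) tuples
--
--     Returns:
--         List of (word, [counts]) tuples
--     """
--     shuffled = defaultdict(list)
--     for key, value in mapped_values:
--         shuffled[key].append(value)
--     return list(shuffled.items())
--
-- def reduce_function(shuffled_values: List[Tuple[str, List[int]]]) -> Dict[str, int]:
--     """
--     Reduce function that sums up counts for each word.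
--
--     Args:
--         shuffled_values: List of (word, [counts]) tuples
--
--     Returns:
--         Dictionary with word frequencies
--     """
--     reduced = {}
--     for key, values in shuffled_values:
--         reduced[key] = sum(values)
--     return reduced
--
-- def map_reduce_parallel(text: str, num_workers: int = 4) -> Dict[str, int]:
--     """
--     Execute MapReduce operation on text with multithreading.
--
--     Args:
--         text: Input text to analyze
--         num_workers: Number of worker threads
--
--     Returns:
--         Dictionary with word frequencies
--     """
--     # Split text into chunks for parallel processing
--     text_length = len(text)
--     chunk_size = max(text_length // num_workers, 1)
--     chunks = []
--
--     for i in range(num_workers):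
--         start = i * chunk_size
--         if i == num_workers - 1:
--             # Last chunk gets remaining text
--             end = text_length
--         else:
--             end = (i + 1) * chunk_size
--         chunks.append(text[start:end])
--
--     # Map phase - process chunks in parallel
--     all_mapped_values = []
--     with ThreadPoolExecutor(max_workers=num_workers) as executor:
--         mapped_results = list(executor.map(map_function, chunks))
--
--     # Combine all mapped values
--     for mapped_chunk in mapped_results:
--         all_mapped_values.extend(mapped_chunk)
--
--     # Shuffle phase
--     shuffled_values = shuffle_function(all_mapped_values)
--
--     # Reduce phase
--     reduced_values = reduce_function(shuffled_values)
--
--     return reduced_values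
-- ===== SOURCE B (Python) =====
-- import string
--
-- _DROP = str.maketrans('', '', string.punctuation)
--
-- def map_reduce_parallel(text: str, num_workers: int = 4):
--     """Single-pass word frequency count: same chunking as the MapReduce
--     version, but one dictionary updated in place instead of the
--     map/shuffle/reduce pipeline."""
--     n = len(text)
--     chunk_size = max(n // num_workers, 1)
--     counts = {}
--     for i in range(num_workers):
--         end = n if i == num_workers - 1 else (i + 1) * chunk_size
--         chunk = text[i * chunk_size:end]
--         cleaned = chunk.lower().translate(_DROP)
--         for word in cleaned.split():
--             if len(word) > 2:
--                 counts[word] = counts.get(word, 0) + 1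
--     return counts
-- ===== Notes on version B (the rewrite author's own statement) =====
-- stated objective: simpler
-- what changed: Replaced the three-stage map/shuffle/reduce pipeline (per-chunk lists of (word,1) pairs, a grouping defaultdict of lists, then a summing dict) with a single loop over the same chunks that increments one counter dict in place.
import Mathlib
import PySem

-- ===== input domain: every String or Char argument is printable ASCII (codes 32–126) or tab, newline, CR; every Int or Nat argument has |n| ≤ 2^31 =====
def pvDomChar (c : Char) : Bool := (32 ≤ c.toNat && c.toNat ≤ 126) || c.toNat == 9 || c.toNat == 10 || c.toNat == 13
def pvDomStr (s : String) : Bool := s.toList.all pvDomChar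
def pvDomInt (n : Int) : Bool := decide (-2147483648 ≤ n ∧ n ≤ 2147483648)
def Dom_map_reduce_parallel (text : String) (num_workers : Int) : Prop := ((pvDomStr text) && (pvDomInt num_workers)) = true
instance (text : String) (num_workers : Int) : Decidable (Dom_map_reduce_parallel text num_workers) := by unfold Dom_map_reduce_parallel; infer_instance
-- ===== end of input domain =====

-- B replaces A's map/shuffle/reduce pipeline (lists of (word, 1) pairs, a grouping dict, a
-- summing dict) with a single loop over the same chunks that increments one counter dict;
-- the equivalence proved is about the RETURN value.

-- ===== PORT A =====
-- string.punctuation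
def pvPunct : List Char := "!\"#$%&'()*+,-./:;<=>?@[\\]^_`{|}~".toList

def pvMapFunction (text : String) : List (String × Int) :=
  let t1 := PySem.Str.lower text
  -- text.translate(str.maketrans('', '', string.punctuation)) deletes exactly the
  -- punctuation characters and keeps every other character: ported as a filter (exact)
  let t2 := String.ofList (t1.toList.filter (fun c => !pvPunct.contains c))
  let words := ((PySem.Str.split₀ t2).filter
      (fun w => 2 < PySem.Str.len (PySem.Str.strip w))).map (fun w => PySem.Str.strip w)
  (words.filter (fun w => !(w == ""))).map (fun w => (w, (1 : Int)))

def pvShuffleFunction (mappedValues : List (String × Int)) : List (String × List Int) :=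
  (mappedValues.foldl (fun d p => d.modify p.1 [] (fun x => x ++ [p.2]))
    (PySem.Dict.empty : PySem.Dict String (List Int))).items

def pvReduceFunction (shuffledValues : List (String × List Int)) : PySem.Dict String Int :=
  shuffledValues.foldl (fun d p => d.insert p.1 p.2.sum)
    (PySem.Dict.empty : PySem.Dict String Int)

def map_reduce_parallel (text : String) (num_workers : Int) : List (String × Int) :=
  let textLength := PySem.Str.len text
  let chunkSize := max (PySem.Int.floordiv textLength num_workers) 1
  let chunks := (PySem.List.pyRange 0 num_workers 1).foldl (fun acc i =>
      acc ++ [PySem.Str.slice text (some (i * chunkSize))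
        (some (if i == num_workers - 1 then textLength else (i + 1) * chunkSize))]) []
  -- ThreadPoolExecutor.map yields results in input order: the parallel map is a list map
  let mappedResults := chunks.map pvMapFunction
  let allMappedValues := mappedResults.foldl (fun acc m => acc ++ m) []
  (pvReduceFunction (pvShuffleFunction allMappedValues)).items

-- ===== PORT B =====
def map_reduce_parallel_alt (text : String) (num_workers : Int) : List (String × Int) :=
  let n := PySem.Str.len text
  let chunkSize := max (PySem.Int.floordiv n num_workers) 1
  let counts := (PySem.List.pyRange 0 num_workers 1).foldl (fun d i =>
      let chunk := PySem.Str.slice text (some (i * chunkSize))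
        (some (if i == num_workers - 1 then n else (i + 1) * chunkSize))
      let cleaned := String.ofList ((PySem.Str.lower chunk).toList.filter
        (fun c => !pvPunct.contains c))
      (PySem.Str.split₀ cleaned).foldl (fun d w =>
        if 2 < PySem.Str.len w then d.insert w (d.getD w 0 + 1) else d) d)
    (PySem.Dict.empty : PySem.Dict String Int)
  counts.items

-- ===== PRECONDITION & SPEC =====
-- Python A raises on num_workers ≤ 0 (ZeroDivisionError at 0, ValueError from
-- ThreadPoolExecutor for negative values); exactly those inputs are excluded.
def Pre_map_reduce_parallel (text : String) (num_workers : Int) : Prop := 1 ≤ num_workers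
instance (text : String) (num_workers : Int) : Decidable (Pre_map_reduce_parallel text num_workers) := by unfold Pre_map_reduce_parallel; infer_instance
def pvWitness_map_reduce_parallel : String × Int := ("hello world, hello!", 4)

def Spec_map_reduce_parallel (text : String) (num_workers : Int) (out : List (String × Int)) : Prop := out = map_reduce_parallel_alt text num_workers
instance (text : String) (num_workers : Int) (out : List (String × Int)) : Decidable (Spec_map_reduce_parallel text num_workers out) := by unfold Spec_map_reduce_parallel; infer_instance

-- ===== CLAIM (what is proved, stated in full; the proofs are below) =====
def Claim_equal_map_reduce_parallel : Prop := ∀ (text : String) (num_workers : Int), Dom_map_reduce_parallel text num_workers → Pre_map_reduce_parallel text num_workers → Spec_map_reduce_parallel text num_workers (map_reduce_parallel text num_workers)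

-- ===== LEMMAS AND PROOFS =====

-- the cleaned (lowercased, punctuation-free) chunk, its counted words, the i-th chunk,
-- and the concatenated word stream of all chunks
def pvClean (s : String) : String :=
  String.ofList ((PySem.Str.lower s).toList.filter (fun c => !pvPunct.contains c))

def pvWords (s : String) : List String :=
  (PySem.Str.split₀ (pvClean s)).filter (fun w => 2 < PySem.Str.len w)

def pvChunk (text : String) (num_workers i : Int) : String :=
  PySem.Str.slice text (some (i * max (PySem.Int.floordiv (PySem.Str.len text) num_workers) 1))
    (some (if i == num_workers - 1 then PySem.Str.len text
      else (i + 1) * max (PySem.Int.floordiv (PySem.Str.len text) num_workers) 1))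

def pvW (text : String) (num_workers : Int) : List String :=
  (PySem.List.pyRange 0 num_workers 1).flatMap (fun i => pvWords (pvChunk text num_workers i))

-- every word produced by str.split() is nonempty and whitespace-free
lemma pv_split₀_go_spec (s : List Char) : ∀ (cur : List Char) (acc : List (List Char)),
    (∀ c ∈ cur, PySem.Chars.isspace c = false) →
    (∀ w ∈ acc, w ≠ [] ∧ ∀ c ∈ w, PySem.Chars.isspace c = false) →
    ∀ w ∈ PySem.Chars.split₀.go s cur acc, w ≠ [] ∧ ∀ c ∈ w, PySem.Chars.isspace c = false := by
  induction s with
  | nil =>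
    intro cur acc hcur hacc w hw
    simp only [PySem.Chars.split₀.go] at hw
    split at hw
    · exact hacc w (by simpa using hw)
    · rcases (by simpa using hw : w ∈ acc ∨ w = cur.reverse) with h | h
      · exact hacc w h
      · subst h
        constructor
        · simp only [ne_eq, List.reverse_eq_nil_iff]
          intro h; simp [h, List.isEmpty_nil] at *
        · intro c hc; exact hcur c (List.mem_reverse.mp hc)
  | cons c rest ih =>
    intro cur acc hcur hacc w hw
    simp only [PySem.Chars.split₀.go] at hw
    split at hw
    · split at hw
      · exact ih [] acc (by simp) hacc w hw
      · refine ih [] (cur.reverse :: acc) (by simp) ?_ w hw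
        intro v hv
        rcases List.mem_cons.mp hv with h | h
        · subst h
          refine ⟨by simp only [ne_eq, List.reverse_eq_nil_iff]; intro h; simp [h] at *, ?_⟩
          intro d hd; exact hcur d (List.mem_reverse.mp hd)
        · exact hacc v h
    · rename_i hcspace
      refine ih (c :: cur) acc ?_ hacc w hw
      intro d hd
      rcases List.mem_cons.mp hd with h | h
      · rw [h]; simpa using hcspace
      · exact hcur d h

lemma pv_mem_split₀_chars (s w : List Char) (hw : w ∈ PySem.Chars.split₀ s) :
    w ≠ [] ∧ ∀ c ∈ w, PySem.Chars.isspace c = false :=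
  pv_split₀_go_spec s [] [] (by simp) (by simp) w hw

lemma pv_dropWhile_of_no (l : List Char) (p : Char → Bool) (h : ∀ c ∈ l, p c = false) :
    l.dropWhile p = l := by
  refine List.dropWhile_eq_self_iff.mpr ?_
  intro hl
  simp [h _ (List.getElem_mem hl)]

lemma pv_strip_no_space (l : List Char) (h : ∀ c ∈ l, PySem.Chars.isspace c = false) :
    PySem.Chars.strip l = l := by
  unfold PySem.Chars.strip PySem.Chars.lstrip PySem.Chars.rstrip
  rw [pv_dropWhile_of_no _ _ h, pv_dropWhile_of_no, List.reverse_reverse]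
  intro c hc; exact h c (List.mem_reverse.mp hc)

lemma pv_mem_split₀ (t w : String) (hw : w ∈ PySem.Str.split₀ t) :
    PySem.Str.strip w = w ∧ w ≠ "" := by
  unfold PySem.Str.split₀ at hw
  rcases List.mem_map.mp hw with ⟨l, hl, rfl⟩
  obtain ⟨hne, hns⟩ := pv_mem_split₀_chars t.toList l hl
  constructor
  · unfold PySem.Str.strip
    rw [String.toList_ofList, pv_strip_no_space l hns]
  · intro h
    exact hne (by simpa using congrArg String.toList h)

-- A's map_function lists exactly the counted words, each paired with 1
lemma pvMapFunction_eq (s : String) :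
    pvMapFunction s = (pvWords s).map (fun w => (w, (1 : Int))) := by
  unfold pvMapFunction pvWords
  have h1 : (PySem.Str.split₀ (pvClean s)).filter
      (fun w => decide (2 < PySem.Str.len (PySem.Str.strip w)))
      = (PySem.Str.split₀ (pvClean s)).filter (fun w => decide (2 < PySem.Str.len w)) :=
    List.filter_congr (fun w hw => by rw [(pv_mem_split₀ _ w hw).1])
  have h2 : ((PySem.Str.split₀ (pvClean s)).filter
      (fun w => decide (2 < PySem.Str.len w))).map (fun w => PySem.Str.strip w)
      = (PySem.Str.split₀ (pvClean s)).filter (fun w => decide (2 < PySem.Str.len w)) := by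
    rw [List.map_congr_left (fun w hw => (pv_mem_split₀ _ w (List.mem_of_mem_filter hw)).1),
      List.map_id']
  have h3 : ((PySem.Str.split₀ (pvClean s)).filter
      (fun w => decide (2 < PySem.Str.len w))).filter (fun w => !(w == ""))
      = (PySem.Str.split₀ (pvClean s)).filter (fun w => decide (2 < PySem.Str.len w)) := by
    refine List.filter_eq_self.mpr (fun w hw => ?_)
    simp [(pv_mem_split₀ _ w (List.mem_of_mem_filter hw)).2]
  show (((((PySem.Str.split₀ (pvClean s)).filter
      (fun w => decide (2 < PySem.Str.len (PySem.Str.strip w)))).map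
      (fun w => PySem.Str.strip w)).filter (fun w => !(w == ""))).map (fun w => (w, (1 : Int))))
      = _
  rw [h1, h2, h3]

-- shuffle-then-reduce over (word, 1) pairs is the counting dict
lemma pvReduceShuffle (W : List String) :
    (pvReduceFunction (pvShuffleFunction (W.map (fun w => (w, (1 : Int)))))).items
      = (PySem.Dict.counter W).items := by
  unfold pvReduceFunction pvShuffleFunction
  set l := W.map (fun w => (w, (1 : Int))) with hl
  set sdict := l.foldl (fun d p => d.modify p.1 [] (fun x => x ++ [p.2]))
    (PySem.Dict.empty : PySem.Dict String (List Int)) with hsd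
  have hkeys : sdict.keys = PySem.Set.ofList W := by
    rw [hsd, PySem.Dict.keys_foldl_modify_key l Prod.fst [] (fun _ p => (fun x => x ++ [p.2]))]
    simp [hl, PySem.Set.ofList_eq_foldl, PySem.Set.update, PySem.Dict.keys_empty,
      Function.comp_def, List.map_map]
  have hnodup : sdict.keys.Nodup := by
    rw [hsd]
    exact PySem.Dict.nodup_keys_foldl_modify_key l Prod.fst [] _ _ (by simp [PySem.Dict.keys_empty])
  have hgetD : ∀ k, sdict.getD k [] = (W.filter (fun w => w == k)).map (fun _ => (1 : Int)) := by
    intro k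
    rw [hsd, PySem.Dict.getD_foldl_modify_append l PySem.Dict.empty k]
    simp [hl, List.filter_map, Function.comp_def]
  have hitems : sdict.items = (PySem.Set.ofList W).map (fun k => (k, sdict.getD k [])) := by
    rw [PySem.Dict.items_eq_map_keys sdict hnodup [], hkeys]
  rw [hitems]
  have hfresh := PySem.Dict.items_foldl_insert_fresh
    (l := (PySem.Set.ofList W).map (fun k => (k, sdict.getD k [])))
    (k := Prod.fst) (v := fun p : String × List Int => p.2.sum)
    (d := PySem.Dict.empty)
    (fun a _ => PySem.Dict.contains_empty a.1)
    (by simp only [List.map_map]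
        have : (Prod.fst ∘ fun k : String => (k, sdict.getD k [])) = id := rfl
        rw [this, List.map_id]
        exact PySem.Set.nodup_ofList W)
  rw [hfresh]
  rw [PySem.Dict.items_counter]
  simp only [PySem.Dict.empty, List.nil_append, List.map_map]
  refine List.map_congr_left (fun k _ => ?_)
  simp only [Function.comp_def, hgetD k, PySem.List.sum_map_const_int]
  congr 1
  rw [List.count_eq_countP, List.countP_eq_length_filter]
  simp

-- A's result is the counting dict over the chunk word stream
lemma pvA_eq (text : String) (num_workers : Int) :
    map_reduce_parallel text num_workers
      = (PySem.Dict.counter (pvW text num_workers)).items := by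
  unfold map_reduce_parallel
  simp only [PySem.List.foldl_append_singleton_eq_map, List.nil_append,
    PySem.List.foldl_append_eq_flatten]
  rw [List.map_congr_left (fun c _ => pvMapFunction_eq c), ← List.flatMap_def,
    ← List.map_flatMap, List.flatMap_map]
  exact pvReduceShuffle _

-- B's result is the same counting dict
lemma pvB_eq (text : String) (num_workers : Int) :
    map_reduce_parallel_alt text num_workers
      = (PySem.Dict.counter (pvW text num_workers)).items := by
  unfold map_reduce_parallel_alt
  have hc : PySem.Dict.counter (pvW text num_workers)
      = (PySem.List.pyRange 0 num_workers 1).foldl (fun d i =>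
          (pvWords (pvChunk text num_workers i)).foldl
            (fun (d : PySem.Dict String Int) w => d.insert w (d.getD w 0 + 1)) d)
        PySem.Dict.empty := by
    rw [← PySem.Dict.foldl_insert_getD_add_one_eq_counter]
    unfold pvW
    rw [List.foldl_flatMap]
  rw [hc]
  refine congrArg PySem.Dict.items (PySem.List.foldl_congr_mem _ _ _ _ ?_)
  intro acc i _
  rw [PySem.List.foldl_ite_eq_foldl_filter (p := fun w => 2 < PySem.Str.len w)]
  rfl

-- ===== VERDICT (by name: the statement is the Claim_ definition above) =====
theorem map_reduce_parallel_spec : Claim_equal_map_reduce_parallel := by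
  intro text num_workers _ _
  unfold Spec_map_reduce_parallel
  rw [pvA_eq, pvB_eq]
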